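-- pv_equiv track=rewrite | github.com/Arsen1302/Code-copy-detector | TestData/solutions/problem_1632_3.py | solution_1632_3
-- ===== SOURCE A (Python) =====
-- from typing import List
--
-- def solution_1632_3(nums: List[int]) -> int:
--     count=0
--     n=len(nums)
--     # for i in range(n):
--     #     for j in range(i+1, n):
--     #         if j-i!=nums[j]-nums[i]:
--     #             count+=1
--     # return count
--     d={}
--     for i in range(n):
--         if nums[i]-i in d:
--             count+=d[nums[i]-i]
--             d[nums[i]-i]+=1
--         else:
--             d[nums[i]-i]=1
--
--     return (n*(n-1)//2) - count
-- ===== SOURCE B (Python) =====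
-- from typing import List
--
-- def solution_1632_3(nums: List[int]) -> int:
--     n = len(nums)
--     # Sort the values nums[i]-i; equal-difference pairs become adjacent runs.
--     diffs = sorted(x - i for i, x in enumerate(nums))
--     same = 0
--     run = 0
--     prev = None
--     for d in diffs:
--         if prev is not None and d == prev:
--             run += 1
--             same += run
--         else:
--             run = 0
--             prev = d
--     return n * (n - 1) // 2 - same
-- ===== Notes on version B (the rewrite author's own statement) =====
-- stated objective: alternative
-- what changed: A counts equal-difference pairs incrementally with a hash map while scanning; B sorts the values nums[i]-i so equal differences become contiguous runs and counts pairs with a single run-length scan over the sorted list, subtracting from n*(n-1)//2 -- sorting replaces the hash map entirely.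
import Mathlib
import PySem

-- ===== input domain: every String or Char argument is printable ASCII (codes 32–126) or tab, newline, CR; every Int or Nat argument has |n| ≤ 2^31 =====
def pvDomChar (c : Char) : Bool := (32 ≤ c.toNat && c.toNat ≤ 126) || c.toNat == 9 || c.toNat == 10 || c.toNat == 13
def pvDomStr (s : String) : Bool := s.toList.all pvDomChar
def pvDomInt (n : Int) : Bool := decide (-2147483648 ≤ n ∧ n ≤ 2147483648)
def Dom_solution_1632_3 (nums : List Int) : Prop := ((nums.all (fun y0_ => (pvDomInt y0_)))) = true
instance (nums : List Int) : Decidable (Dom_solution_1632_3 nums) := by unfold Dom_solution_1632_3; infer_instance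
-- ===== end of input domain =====

-- B replaces A's hash-map incremental pair count by sorting the values nums[i]-i and counting
-- equal pairs with a single run-length scan over the sorted list; same result, different algorithm.

-- ===== PORT A =====
def solution_1632_3 (nums : List Int) : Int :=
  let n : Int := nums.length
  let res := (PySem.List.enumerate nums 0).foldl
    (fun (s : Int × PySem.Dict Int Int) p =>
      let k := p.2 - p.1
      if s.2.contains k then (s.1 + s.2.getD k 0, s.2.insert k (s.2.getD k 0 + 1))
      else (s.1, s.2.insert k 1))
    (0, PySem.Dict.empty)
  PySem.Int.floordiv (n * (n - 1)) 2 - res.1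

-- ===== PORT B =====
def solution_1632_3_alt (nums : List Int) : Int :=
  let n : Int := nums.length
  let diffs := PySem.List.sorted ((PySem.List.enumerate nums 0).map (fun p => p.2 - p.1)) (fun x => x) false
  -- state (prev, run, same); Python's 'prev is not None and d == prev' is 'prev = some d'
  let res := diffs.foldl
    (fun (s : Option Int × Int × Int) d =>
      if s.1 = some d then (some d, s.2.1 + 1, s.2.2 + (s.2.1 + 1))
      else (some d, 0, s.2.2))
    (none, 0, 0)
  PySem.Int.floordiv (n * (n - 1)) 2 - res.2.2

-- ===== PRECONDITION & SPEC =====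
def Spec_solution_1632_3 (nums : List Int) (out : Int) : Prop := out = solution_1632_3_alt nums
instance (nums : List Int) (out : Int) : Decidable (Spec_solution_1632_3 nums out) := by unfold Spec_solution_1632_3; infer_instance

-- ===== CLAIM (what is proved, stated in full; the proofs are below) =====
def Claim_equal_solution_1632_3 : Prop := ∀ (nums : List Int), Dom_solution_1632_3 nums → Spec_solution_1632_3 nums (solution_1632_3 nums)

-- ===== LEMMAS AND PROOFS =====

-- c*(c-1)//2, the number of pairs inside a group of size c
def pvC2 (m : Int) : Int := PySem.Int.floordiv (m * (m - 1)) 2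

-- the number of equal pairs of ks, as a sum over its distinct values
def pvH (ks : List Int) : Int :=
  ((PySem.Set.ofList ks).map (fun k => pvC2 ((ks.count k : Int)))).sum

-- A's running accumulation, abstracted: processed prefix l, remaining keys
def pvG (l : List Int) : List Int → Int
  | [] => 0
  | k :: t => (l.count k : Int) + pvG (l ++ [k]) t

-- B's scan step
def pvStep (s : Option Int × Int × Int) (d : Int) : Option Int × Int × Int :=
  if s.1 = some d then (some d, s.2.1 + 1, s.2.2 + (s.2.1 + 1))
  else (some d, 0, s.2.2)

theorem pvC2_succ (m : Int) : pvC2 (m + 1) = pvC2 m + m := by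
  obtain ⟨a, ha⟩ := Int.even_mul_succ_self (m - 1)
  unfold pvC2
  rw [PySem.Int.floordiv_eq_ediv_of_pos (by norm_num),
      PySem.Int.floordiv_eq_ediv_of_pos (by norm_num)]
  have e1 : (m + 1) * (m + 1 - 1) = a + a + 2 * m := by linear_combination ha
  have e2 : m * (m - 1) = a + a := by linear_combination ha
  rw [e1, e2]; omega

theorem pv_sum_map_update (S : List Int) (f g : Int → Int) (k : Int)
    (hnd : S.Nodup) (hk : k ∈ S) (h : ∀ j ∈ S, j ≠ k → g j = f j) :
    (S.map g).sum = (S.map f).sum + (g k - f k) := by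
  induction S with
  | nil => cases hk
  | cons a t ih =>
    rcases List.mem_cons.mp hk with rfl | hkt
    · have hnk : k ∉ t := (List.nodup_cons.mp hnd).1
      have : t.map g = t.map f := List.map_congr_left (fun j hj =>
        h j (List.mem_cons_of_mem _ hj) (fun hjk => hnk (hjk ▸ hj)))
      simp [this]; ring
    · have hak : a ≠ k := fun hak => (List.nodup_cons.mp hnd).1 (hak ▸ hkt)
      have hga : g a = f a := h a (List.mem_cons_self) hak
      have := ih (List.nodup_cons.mp hnd).2 hkt
        (fun j hj hjk => h j (List.mem_cons_of_mem _ hj) hjk)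
      simp [hga, this]; ring

theorem pvH_append (l : List Int) (k : Int) :
    pvH (l ++ [k]) = pvH l + (l.count k : Int) := by
  unfold pvH
  rw [PySem.Set.ofList_append_singleton]
  have hcnt : ∀ j : Int, (l ++ [k]).count j = l.count j + if k = j then 1 else 0 := by
    intro j
    rw [List.count_append]
    by_cases h : k = j
    · subst h; simp
    · simp [h]
  by_cases hk : k ∈ l
  · have hadd : (PySem.Set.ofList l).add k = PySem.Set.ofList l := by
      simp [PySem.Set.add, List.contains_eq_mem, (PySem.Set.mem_ofList l k).mpr hk]
    rw [hadd]
    rw [pv_sum_map_update (PySem.Set.ofList l)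
        (fun j => pvC2 ((l.count j : Int)))
        (fun j => pvC2 (((l ++ [k]).count j : Int))) k
        (PySem.Set.nodup_ofList l) ((PySem.Set.mem_ofList l k).mpr hk)
        (fun j _ hjk => by
          show pvC2 (((l ++ [k]).count j : Int)) = pvC2 ((l.count j : Int))
          rw [hcnt j, if_neg (fun h => hjk h.symm)]; simp)]
    have : (((l ++ [k]).count k : Int)) = ((l.count k : Int)) + 1 := by
      rw [hcnt k, if_pos rfl]; push_cast; ring
    rw [this, pvC2_succ]; ring
  · have hknot : k ∉ PySem.Set.ofList l := fun h => hk ((PySem.Set.mem_ofList l k).mp h)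
    have hadd : (PySem.Set.ofList l).add k = PySem.Set.ofList l ++ [k] := by
      simp [PySem.Set.add, List.contains_eq_mem, hknot]
    rw [hadd, List.map_append, List.sum_append]
    have h1 : (PySem.Set.ofList l).map (fun j => pvC2 (((l ++ [k]).count j : Int)))
        = (PySem.Set.ofList l).map (fun j => pvC2 ((l.count j : Int))) := by
      refine List.map_congr_left (fun j hj => ?_)
      have hjk : k ≠ j := fun h => hk (h ▸ (PySem.Set.mem_ofList l j).mp hj)
      rw [hcnt j, if_neg hjk]; simp
    have h2 : (l ++ [k]).count k = 1 := by
      rw [hcnt k, if_pos rfl, List.count_eq_zero_of_not_mem hk]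
    have h3 : l.count k = 0 := List.count_eq_zero_of_not_mem hk
    have h4 : pvC2 (((l ++ [k]).count k : Int)) = 0 := by rw [h2]; decide
    rw [h1]
    simp only [List.map_cons, List.map_nil, List.sum_cons, List.sum_nil, h4, h3]
    norm_num

theorem pvG_add_pvH : ∀ (ks l : List Int), pvG l ks + pvH l = pvH (l ++ ks) := by
  intro ks
  induction ks with
  | nil => intro l; simp [pvG]
  | cons k t ih =>
    intro l
    have := ih (l ++ [k])
    rw [pvH_append] at this
    have hassoc : l ++ [k] ++ t = l ++ (k :: t) := by simp
    rw [hassoc] at this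
    simp only [pvG]
    omega

theorem pvH_perm (l l' : List Int) (hp : l.Perm l') : pvH l = pvH l' := by
  unfold pvH
  have hs : (PySem.Set.ofList l).Perm (PySem.Set.ofList l') := by
    refine (List.perm_ext_iff_of_nodup (PySem.Set.nodup_ofList l) (PySem.Set.nodup_ofList l')).mpr ?_
    intro a
    rw [PySem.Set.mem_ofList, PySem.Set.mem_ofList]
    exact hp.mem_iff
  have h1 : (PySem.Set.ofList l).map (fun k => pvC2 ((l.count k : Int)))
      = (PySem.Set.ofList l).map (fun k => pvC2 ((l'.count k : Int))) :=
    List.map_congr_left (fun k _ => by rw [hp.count_eq])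
  rw [h1]
  exact (hs.map _).sum_eq

theorem pv_aloop (ps : List (Int × Int)) : ∀ (c : Int) (l : List Int),
    (ps.foldl
      (fun (s : Int × PySem.Dict Int Int) p =>
        let k := p.2 - p.1
        if s.2.contains k then (s.1 + s.2.getD k 0, s.2.insert k (s.2.getD k 0 + 1))
        else (s.1, s.2.insert k 1))
      (c, PySem.Dict.counter l)).1
    = c + pvG l (ps.map (fun p => p.2 - p.1)) := by
  induction ps with
  | nil => intro c l; simp [pvG]
  | cons p t ih =>
    intro c l
    have key : (let k := p.2 - p.1;
        if (c, PySem.Dict.counter l).2.contains k = true then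
          ((c, PySem.Dict.counter l).1 + (c, PySem.Dict.counter l).2.getD k 0,
            (c, PySem.Dict.counter l).2.insert k ((c, PySem.Dict.counter l).2.getD k 0 + 1))
        else ((c, PySem.Dict.counter l).1, (c, PySem.Dict.counter l).2.insert k 1))
        = (c + (l.count (p.2 - p.1) : Int), PySem.Dict.counter (l ++ [p.2 - p.1])) := by
      show (if (PySem.Dict.counter l).contains (p.2 - p.1) = true then
              (c + (PySem.Dict.counter l).getD (p.2 - p.1) 0,
               (PySem.Dict.counter l).insert (p.2 - p.1) ((PySem.Dict.counter l).getD (p.2 - p.1) 0 + 1))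
            else (c, (PySem.Dict.counter l).insert (p.2 - p.1) 1))
          = (c + (l.count (p.2 - p.1) : Int), PySem.Dict.counter (l ++ [p.2 - p.1]))
      have hins : (PySem.Dict.counter l).insert (p.2 - p.1)
          ((PySem.Dict.counter l).getD (p.2 - p.1) 0 + 1)
          = PySem.Dict.counter (l ++ [p.2 - p.1]) := by
        rw [PySem.Dict.counter_append_singleton]
        exact PySem.Dict.ext_iff.mpr rfl
      by_cases hk : p.2 - p.1 ∈ l
      · have hc : (PySem.Dict.counter l).contains (p.2 - p.1) = true := by
          rw [PySem.Dict.contains_counter]; exact List.elem_eq_true_of_mem hk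
        rw [hc, if_pos rfl, hins, PySem.Dict.getD_counter]
      · have hc : (PySem.Dict.counter l).contains (p.2 - p.1) = false := by
          rw [PySem.Dict.contains_counter]
          exact Bool.eq_false_iff.mpr (fun h => hk (List.mem_of_elem_eq_true h))
        have h0 : (PySem.Dict.counter l).getD (p.2 - p.1) 0 = 0 := by
          rw [PySem.Dict.getD_counter, List.count_eq_zero_of_not_mem hk]; rfl
        rw [hc, if_neg (by simp), ← hins, h0, List.count_eq_zero_of_not_mem hk]
        norm_num
    rw [List.foldl_cons, key, ih]
    simp only [List.map_cons, pvG]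
    ring

-- B's run-length scan over a remaining sorted tail m, with processed prefix p whose maximum is v
theorem pv_bloop : ∀ (m p : List Int) (v : Int),
    m.Pairwise (· ≤ ·) → v ∈ p → (∀ x ∈ p, x ≤ v) → (∀ x ∈ m, v ≤ x) →
    (m.foldl pvStep (some v, (p.count v : Int) - 1, pvH p)).2.2 = pvH (p ++ m) := by
  intro m
  induction m with
  | nil => intro p v _ _ _ _; simp
  | cons d t ih =>
    intro p v hpw hvp hmax hle
    have hvd : v ≤ d := hle d (List.mem_cons_self)
    have htw : t.Pairwise (· ≤ ·) := (List.pairwise_cons.mp hpw).2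
    have hdt : ∀ x ∈ t, d ≤ x := (List.pairwise_cons.mp hpw).1
    have hpd : p ++ (d :: t) = (p ++ [d]) ++ t := by simp
    rw [hpd, List.foldl_cons]
    by_cases hdv : d = v
    · subst hdv
      have hstep : pvStep (some d, (p.count d : Int) - 1, pvH p) d
          = (some d, ((p ++ [d]).count d : Int) - 1, pvH (p ++ [d])) := by
        unfold pvStep
        rw [if_pos rfl, pvH_append]
        have : ((p ++ [d]).count d : Int) = (p.count d : Int) + 1 := by
          rw [List.count_append]; push_cast; simp
        rw [this]
        simp only [Prod.mk.injEq]
        exact ⟨trivial, by omega, by omega⟩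
      rw [hstep]
      exact ih (p ++ [d]) d htw (by simp)
        (fun x hx => by rcases List.mem_append.mp hx with h | h
                        · exact hmax x h
                        · simp at h; omega)
        hdt
    · have hvltd : v < d := lt_of_le_of_ne hvd (fun h => hdv h.symm)
      have hdnp : d ∉ p := fun h => absurd (hmax d h) (not_le.mpr hvltd)
      have hstep : pvStep (some v, (p.count v : Int) - 1, pvH p) d
          = (some d, ((p ++ [d]).count d : Int) - 1, pvH (p ++ [d])) := by
        unfold pvStep
        rw [if_neg (by simp; omega), pvH_append]
        have hc0 : p.count d = 0 := List.count_eq_zero_of_not_mem hdnp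
        have : ((p ++ [d]).count d : Int) = 1 := by
          rw [List.count_append, hc0]; simp
        rw [this, hc0]
        simp only [Prod.mk.injEq]
        exact ⟨trivial, by omega, by omega⟩
      rw [hstep]
      exact ih (p ++ [d]) d htw (by simp)
        (fun x hx => by rcases List.mem_append.mp hx with h | h
                        · exact le_of_lt (lt_of_le_of_lt (hmax x h) hvltd)
                        · simp at h; omega)
        hdt

theorem pv_bscan (m : List Int) (hpw : m.Pairwise (· ≤ ·)) :
    (m.foldl pvStep (none, 0, 0)).2.2 = pvH m := by
  cases m with
  | nil => rfl
  | cons d t =>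
    rw [List.foldl_cons]
    have hstep : pvStep (none, 0, 0) d = (some d, (([d].count d : Int)) - 1, pvH [d]) := by
      unfold pvStep
      rw [if_neg (by simp)]
      simp only [Prod.mk.injEq]
      refine ⟨trivial, by simp, ?_⟩
      have h := pvH_append [] d
      simp only [List.nil_append] at h
      have h0 : pvH ([] : List Int) = 0 := rfl
      simp [h, h0]
    rw [hstep]
    have := pv_bloop t [d] d (List.pairwise_cons.mp hpw).2 (List.mem_cons_self)
      (by simp) (List.pairwise_cons.mp hpw).1
    simpa using this

theorem solution_1632_3_spec : Claim_equal_solution_1632_3 := by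
  unfold Claim_equal_solution_1632_3
  intro nums _
  unfold Spec_solution_1632_3 solution_1632_3 solution_1632_3_alt
  have h0 : (PySem.Dict.empty : PySem.Dict Int Int) = PySem.Dict.counter [] := rfl
  simp only [h0, pv_aloop]
  have hstepf : (fun (s : Option Int × Int × Int) d =>
      if s.1 = some d then (some d, s.2.1 + 1, s.2.2 + (s.2.1 + 1))
      else (some d, 0, s.2.2)) = pvStep := rfl
  rw [hstepf]
  set ks := (PySem.List.enumerate nums 0).map (fun p => p.2 - p.1) with hks
  have hA : pvG [] ks = pvH ks := by
    have := pvG_add_pvH ks []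
    simp only [List.nil_append] at this
    have h0 : pvH ([] : List Int) = 0 := rfl
    omega
  have hB : ((PySem.List.sorted ks (fun x => x) false).foldl pvStep (none, 0, 0)).2.2 = pvH ks := by
    rw [pv_bscan _ (by simpa using PySem.List.sorted_pairwise ks (fun x => x))]
    exact pvH_perm _ _ (PySem.List.sorted_perm ks (fun x => x) false)
  rw [hB]
  omega
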